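-- pv_equiv track=rewrite | github.com/BigZano/advent_2025 | day_10/part_1.py | min_weight_solution
-- ===== SOURCE A (Python) =====
-- from typing import List, Optional, Tuple
--
-- def min_weight_solution(particular: int, basis: List[int], cutoff: int = 26) -> int:
--     """Enumerate the affine space particular + span(basis) to find minimal popcount.
--
--     If the nullspace dimension is too large (> cutoff), this will still attempt enumeration
--     but may be slow. Default cutoff is conservative; if you expect larger, increase it.
--     Returns minimal popcount (number of button presses modulo parity).
--     """
--     k = len(basis)
--     if k == 0:
--         return particular.bit_count()
--     if k > cutoff:
--         # fallback: use meet-in-the-middle over the basis if dimension is reasonable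
--         if k <= 40:
--             # we need to find v in span(basis) that minimizes popcount(particular ^ v)
--             # do meet-in-the-middle on basis vectors: enumerate left/right spans and
--             # for each left store map from xor -> minimal popcount of combined vector on that half,
--             # then combine with right to compute full vector popcount.
--             m = 0
--             # determine number of bits in vectors (m) from highest bit in basis or particular
--             for v in basis:
--                 if v:
--                     m = max(m, v.bit_length())
--             m = max(m, particular.bit_length())
--
--             half = k // 2
--             left = basis[:half]
--             right = basis[half:]
--
--             left_map = {}
--             for s in range(1 << len(left)):
--                 xorv = 0
--                 i = 0
--                 ss = s
--                 while ss:
--                     if ss & 1: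
--                         xorv ^= left[i]
--                     ss >>= 1
--                     i += 1
--                 vec = particular ^ xorv
--                 pc = vec.bit_count()
--                 if xorv not in left_map or pc < left_map[xorv]:
--                     left_map[xorv] = pc
--
--             best_w = None
--             for s in range(1 << len(right)):
--                 xorv = 0
--                 i = 0
--                 ss = s
--                 while ss:
--                     if ss & 1:
--                         xorv ^= right[i]
--                     ss >>= 1
--                     i += 1
--                 # for this right xorv, combined vector is particular ^ xorv ^ xor_left
--                 # we need minimal over xor_left; iterate left_map entries
--                 for xor_left, pc_left in left_map.items():
--                     total_pc = pc_left if xor_left == 0 else None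
--                     # Instead of recomputing fully, compute final popcount directly
--                     cand_vec = particular ^ xor_left ^ xorv
--                     total_pc = cand_vec.bit_count()
--                     if best_w is None or total_pc < best_w:
--                         best_w = total_pc
--             return best_w if best_w is not None else particular.bit_count()
--         # otherwise fall back to greedy hill-climb
--         best = particular
--         best_w = best.bit_count()
--         improved = True
--         while improved:
--             improved = False
--             for v in basis:
--                 cand = best ^ v
--                 w = cand.bit_count()
--                 if w < best_w:
--                     best = cand
--                     best_w = w
--                     improved = True
--         return best_w
--
--     best = None
--     best_w = None
--     for mask in range(1 << k):
--         s = particular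
--         msk = mask
--         i = 0
--         while msk:
--             if msk & 1:
--                 s ^= basis[i]
--             msk >>= 1
--             i += 1
--         w = s.bit_count()
--         if best_w is None or w < best_w:
--             best_w = w
--             best = s
--     return best_w if best_w is not None else 0
-- ===== SOURCE B (Python) =====
-- def min_weight_solution(particular: int, basis, cutoff: int = 26) -> int:
--     """Minimal popcount over the affine XOR-span, by doubling the span list.
--
--     Builds the whole affine span incrementally (one XOR per produced element)
--     instead of re-deriving each subset XOR bit by bit from a mask; for a
--     dimension too large to enumerate (> 40 and > cutoff) it falls back to a
--     greedy local search, as any exact enumeration is infeasible there.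
--     """
--     k = len(basis)
--     if k <= cutoff or k <= 40:
--         span = [particular]
--         for v in basis:
--             span = span + [x ^ v for x in span]
--         return min(x.bit_count() for x in span)
--     # dimension too large to enumerate: greedy hill-climb to a local optimum
--     x, w = particular, particular.bit_count()
--     changed = True
--     while changed:
--         x, w, changed = _sweep(x, w, basis)
--     return w
--
--
-- def _sweep(x: int, w: int, basis):
--     changed = False
--     for v in basis:
--         c = x ^ v
--         cw = c.bit_count()
--         if cw < w:
--             x, w, changed = c, cw, True
--     return x, w, changed
-- ===== Notes on version B (the rewrite author's own statement) =====
-- stated objective: alternative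
-- what changed: B enumerates the affine XOR-span by doubling a span list (one XOR per produced element) instead of re-deriving each subset XOR bit-by-bit from a mask (and instead of A's meet-in-the-middle dict variant when cutoff < k <= 40), keeping a greedy hill-climb only for the infeasible dimension k > 40 and k > cutoff; it trades O(2^k) memory for the simpler single enumeration pass.
import Mathlib
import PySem

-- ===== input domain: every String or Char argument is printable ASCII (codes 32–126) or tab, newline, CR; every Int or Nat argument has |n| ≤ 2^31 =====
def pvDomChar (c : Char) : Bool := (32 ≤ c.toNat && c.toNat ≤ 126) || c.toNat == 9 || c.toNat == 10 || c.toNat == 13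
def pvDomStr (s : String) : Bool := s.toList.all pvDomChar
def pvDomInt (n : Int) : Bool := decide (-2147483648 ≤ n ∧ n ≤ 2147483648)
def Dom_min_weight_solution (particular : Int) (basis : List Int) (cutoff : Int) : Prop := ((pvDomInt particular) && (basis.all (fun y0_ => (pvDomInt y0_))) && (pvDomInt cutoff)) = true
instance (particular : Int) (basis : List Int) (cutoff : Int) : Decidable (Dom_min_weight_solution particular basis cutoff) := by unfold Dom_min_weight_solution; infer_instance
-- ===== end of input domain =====

-- B replaces A's per-mask bit-decoding enumeration (and its meet-in-the-middle variant) by one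
-- span-doubling pass, one XOR per produced element; A's greedy fallback for infeasible dimension
-- (> 40 and > cutoff) is kept, restructured as a helper-pass recursion. Return values agree on all inputs.

-- ===== PORT A helpers =====
-- the inner 'while msk: if msk & 1: s ^= basis[i]; msk >>= 1; i += 1' loop of A:
-- walking the index i over 'bs' sequentially is walking the list (exact for the
-- masks A produces, msk < 2^len(bs); on bs exhausted with msk ≠ 0 Python would raise,
-- which no mask in range(1 << len(bs)) reaches)
def pvSubXor (s : Int) (bs : List Int) (msk : Int) : Int :=
  if msk = 0 then s
  else match bs with
    | [] => s
    | b :: t => pvSubXor (if PySem.Int.band msk 1 = 1 then PySem.Int.bxor s b else s) t (msk >>> (1:Nat))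

-- A's final brute-force loop: first-strict-minimum tracking (best, best_w) as Options
def pvScanA (particular : Int) (bs : List Int) : Option Int × Option Int :=
  (PySem.List.pyRange 0 ((1:Int) <<< bs.length) 1).foldl
    (fun (st : Option Int × Option Int) mask =>
      let s := pvSubXor particular bs mask
      let w : Int := PySem.Int.bitCount s
      match st.2 with
      | none => (some s, some w)
      | some bw => if w < bw then (some s, some w) else st)
    (none, none)

-- A's greedy hill-climb: one 'for v in basis' pass over (best, best_w, improved)
def pvPassA (best best_w : Int) (improved : Bool) : List Int → Int × Int × Bool
  | [] => (best, best_w, improved)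
  | v :: t =>
    let cand := PySem.Int.bxor best v
    let w : Int := PySem.Int.bitCount cand
    if w < best_w then pvPassA cand w true t else pvPassA best best_w improved t

theorem pvPassA_le (bs : List Int) (x w : Int) (imp : Bool) : (pvPassA x w imp bs).2.1 ≤ w := by
  induction bs generalizing x w imp with
  | nil => simp [pvPassA]
  | cons v t ih =>
    simp only [pvPassA]
    split
    · exact le_of_lt (lt_of_le_of_lt (ih _ _ _) (by omega))
    · exact ih _ _ _

theorem pvPassA_nonneg_of (bs : List Int) (x w : Int) (imp : Bool) (h : 0 ≤ w) :
    0 ≤ (pvPassA x w imp bs).2.1 := by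
  induction bs generalizing x w imp with
  | nil => simpa [pvPassA]
  | cons v t ih =>
    simp only [pvPassA]
    split
    · exact ih _ _ _ (Int.natCast_nonneg _)
    · exact ih _ _ _ h

theorem pvPassA_progress (bs : List Int) (x w : Int)
    (h : (pvPassA x w false bs).2.2 = true) :
    (pvPassA x w false bs).2.1 < w ∧ 0 ≤ (pvPassA x w false bs).2.1 := by
  induction bs generalizing x w with
  | nil => simp [pvPassA] at h
  | cons v t ih =>
    simp only [pvPassA] at h ⊢
    split
    · rename_i hlt
      refine ⟨lt_of_le_of_lt (pvPassA_le _ _ _ _) hlt, pvPassA_nonneg_of _ _ _ _ (Int.natCast_nonneg _)⟩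
    · rename_i hge
      simp only [if_neg hge] at h
      exact ih _ _ h

-- A's 'while improved:' outer loop
def pvClimbA (best best_w : Int) (bs : List Int) : Int :=
  let r := pvPassA best best_w false bs
  if h : r.2.2 = true then pvClimbA r.1 r.2.1 bs else r.2.1
termination_by best_w.toNat
decreasing_by
  have := pvPassA_progress bs best best_w h
  omega

-- ===== PORT A =====
-- A's 'k > cutoff and k <= 40' branch: meet-in-the-middle over basis[:k//2] / basis[k//2:]
def pvMitmA (particular : Int) (basis : List Int) : Int :=
  let k : Int := basis.length
  let m : Nat := basis.foldl (fun m v => if v ≠ 0 then max m (PySem.Int.bitLength v) else m) 0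
  let _m : Nat := max m (PySem.Int.bitLength particular)  -- computed by A, never used
  let half : Int := PySem.Int.floordiv k 2
  let left := PySem.List.slice basis none (some half)
  let right := PySem.List.slice basis (some half) none
  let leftMap : PySem.Dict Int Int :=
    (PySem.List.pyRange 0 ((1:Int) <<< left.length) 1).foldl
      (fun d s =>
        let xorv := pvSubXor 0 left s
        let vec := PySem.Int.bxor particular xorv
        let pc : Int := PySem.Int.bitCount vec
        match d.get? xorv with
        | none => d.insert xorv pc
        | some old => if pc < old then d.insert xorv pc else d)
      PySem.Dict.empty
  let bestW : Option Int :=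
    (PySem.List.pyRange 0 ((1:Int) <<< right.length) 1).foldl
      (fun bw s =>
        let xorv := pvSubXor 0 right s
        leftMap.items.foldl
          (fun (bw : Option Int) kv =>
            -- A's dead 'total_pc = pc_left if xor_left == 0 else None' is immediately overwritten
            let cand := PySem.Int.bxor (PySem.Int.bxor particular kv.1) xorv
            let tpc : Int := PySem.Int.bitCount cand
            match bw with
            | none => some tpc
            | some b => if tpc < b then some tpc else bw)
          bw)
      none
  match bestW with
  | some b => b
  | none => PySem.Int.bitCount particular

def min_weight_solution (particular : Int) (basis : List Int) (cutoff : Int) : Int :=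
  let k : Int := basis.length
  if k = 0 then PySem.Int.bitCount particular
  else if k > cutoff then
    if k ≤ 40 then pvMitmA particular basis
    else pvClimbA particular (PySem.Int.bitCount particular) basis
  else
    match (pvScanA particular basis).2 with
    | some bw => bw
    | none => 0

-- ===== PORT B helpers =====
def pvSweep (x w : Int) (changed : Bool) : List Int → Int × Int × Bool
  | [] => (x, w, changed)
  | v :: t =>
    let c := PySem.Int.bxor x v
    let cw : Int := PySem.Int.bitCount c
    if cw < w then pvSweep c cw true t else pvSweep x w changed t

theorem pvSweep_eq_passA (bs : List Int) (x w : Int) (c : Bool) : pvSweep x w c bs = pvPassA x w c bs := by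
  induction bs generalizing x w c with
  | nil => rfl
  | cons v t ih => simp only [pvSweep, pvPassA]; split <;> exact ih _ _ _

def pvClimbB (x w : Int) (bs : List Int) : Int :=
  let r := pvSweep x w false bs
  if h : r.2.2 = true then pvClimbB r.1 r.2.1 bs else r.2.1
termination_by w.toNat
decreasing_by
  rw [show r = pvSweep x w false bs from rfl, pvSweep_eq_passA] at h
  rw [pvSweep_eq_passA]
  have := pvPassA_progress bs x w h
  omega

def pvSpan (particular : Int) (bs : List Int) : List Int :=
  bs.foldl (fun span v => span ++ span.map (fun x => PySem.Int.bxor x v)) [particular]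

-- ===== PORT B =====
def min_weight_solution_alt (particular : Int) (basis : List Int) (cutoff : Int) : Int :=
  let k : Int := basis.length
  if k ≤ cutoff ∨ k ≤ 40 then
    let span := pvSpan particular basis
    match PySem.List.min? (span.map (fun x => (PySem.Int.bitCount x : Int))) (fun y => y) with
    | some m => m
    | none => 0  -- unreachable: span is nonempty, Python's min never raises here
  else
    pvClimbB particular (PySem.Int.bitCount particular) basis


-- ===== PRECONDITION & SPEC =====
def Spec_min_weight_solution (particular : Int) (basis : List Int) (cutoff : Int) (out : Int) : Prop := out = min_weight_solution_alt particular basis cutoff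
instance (particular : Int) (basis : List Int) (cutoff : Int) (out : Int) : Decidable (Spec_min_weight_solution particular basis cutoff out) := by unfold Spec_min_weight_solution; infer_instance

-- ===== CLAIM (what is proved, stated in full; the proofs are below) =====
def Claim_equal_min_weight_solution : Prop := ∀ (particular : Int) (basis : List Int) (cutoff : Int), Dom_min_weight_solution particular basis cutoff → Spec_min_weight_solution particular basis cutoff (min_weight_solution particular basis cutoff)

-- ===== LEMMAS AND PROOFS =====
-- ===== basic bxor algebra =====
theorem pvBx2 (m n : Nat) : PySem.Int.bxor (Int.negSucc m) (Int.ofNat n) = Int.negSucc (m ^^^ n) := by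
  unfold PySem.Int.bxor
  simp only [Int.ofNat_eq_natCast, Int.negSucc_eq]
  rw [if_neg (by omega), if_pos (by omega)]
  have h1 : (-(-((m:Int) + 1)) - 1).toNat = m := by omega
  have h2 : ((n:Int)).toNat = n := by omega
  rw [h1, h2]; omega
theorem pvBx3 (m n : Nat) : PySem.Int.bxor (Int.ofNat m) (Int.negSucc n) = Int.negSucc (m ^^^ n) := by
  unfold PySem.Int.bxor
  simp only [Int.ofNat_eq_natCast, Int.negSucc_eq]
  rw [if_pos (by omega), if_neg (by omega)]
  have h1 : (-(-((n:Int) + 1)) - 1).toNat = n := by omega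
  have h2 : ((m:Int)).toNat = m := by omega
  rw [h1, h2]; omega
theorem pvBx4 (m n : Nat) : PySem.Int.bxor (Int.negSucc m) (Int.negSucc n) = Int.ofNat (m ^^^ n) := by
  unfold PySem.Int.bxor
  simp only [Int.ofNat_eq_natCast, Int.negSucc_eq]
  rw [if_neg (by omega), if_neg (by omega)]
  have h1 : (-(-((m:Int) + 1)) - 1).toNat = m := by omega
  have h2 : (-(-((n:Int) + 1)) - 1).toNat = n := by omega
  rw [h1, h2]
theorem pvBx1 (m n : Nat) : PySem.Int.bxor (Int.ofNat m) (Int.ofNat n) = Int.ofNat (m ^^^ n) := by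
  simp only [Int.ofNat_eq_natCast]; exact PySem.Int.bxor_natCast m n
theorem pvBxor_assoc (a b c : Int) : PySem.Int.bxor (PySem.Int.bxor a b) c = PySem.Int.bxor a (PySem.Int.bxor b c) := by
  cases a <;> cases b <;> cases c <;> simp only [pvBx1, pvBx2, pvBx3, pvBx4, Nat.xor_assoc]
-- ===== pvSubXor basics =====
theorem pvSubXor_zero (s : Int) (bs : List Int) : pvSubXor s bs 0 = s := by
  cases bs <;> simp [pvSubXor]

theorem pvSubXor_nil (s : Int) (m : Int) : pvSubXor s [] m = s := by
  unfold pvSubXor; split <;> rfl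

theorem pvSubXor_cons_nat (s b : Int) (t : List Int) (n : Nat) :
    pvSubXor s (b :: t) (n : Int)
      = pvSubXor (if n % 2 = 1 then PySem.Int.bxor s b else s) t ((n / 2 : Nat) : Int) := by
  by_cases h : n = 0
  · subst h; simp [pvSubXor_zero, pvSubXor]
  · rw [pvSubXor, if_neg (by exact_mod_cast h)]
    have hband : PySem.Int.band (n : Int) 1 = ((n % 2 : Nat) : Int) := by
      have := PySem.Int.band_natCast n 1
      simpa [Nat.and_one_is_mod] using this
    have hshift : ((n : Int) >>> (1 : Nat)) = ((n / 2 : Nat) : Int) := by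
      simp [Int.shiftRight_eq_div_pow]
    rw [hband, hshift]
    congr 1
    by_cases hm : n % 2 = 1
    · rw [if_pos (by exact_mod_cast hm), if_pos hm]
    · rw [if_neg (by exact_mod_cast hm), if_neg hm]

theorem pvSubXor_split (l r : List Int) (s : Int) (nl nr : Nat) (h : nl < 2 ^ l.length) :
    pvSubXor s (l ++ r) ((nl + 2 ^ l.length * nr : Nat) : Int)
      = pvSubXor (pvSubXor s l (nl : Int)) r (nr : Int) := by
  induction l generalizing s nl with
  | nil =>
    have : nl = 0 := by simpa using h
    subst this
    simp [pvSubXor_zero]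
  | cons b t ih =>
    generalize hM : 2 ^ t.length = M at *
    have hp : 2 ^ (b :: t).length = 2 * M := by
      simp [List.length_cons, pow_succ, Nat.mul_comm, hM]
    rw [List.cons_append, pvSubXor_cons_nat, pvSubXor_cons_nat]
    have e1 : nl + 2 * M * nr = nl + 2 * (M * nr) := by ring
    have hmod : (nl + 2 ^ (b :: t).length * nr) % 2 = nl % 2 := by
      rw [hp, e1]; omega
    have hdiv : (nl + 2 ^ (b :: t).length * nr) / 2 = nl / 2 + M * nr := by
      rw [hp, e1]; omega
    rw [hmod, hdiv]
    exact ih _ _ (by rw [hp] at h; omega)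

theorem pvSubXor_single (x v : Int) : pvSubXor x [v] ((1 : Nat) : Int) = PySem.Int.bxor x v := by
  rw [pvSubXor_cons_nat]
  norm_num [pvSubXor_nil]

theorem pvSubXor_base_aux (u : Int) (bs : List Int) : ∀ (n : Nat) (w : Int),
    pvSubXor (PySem.Int.bxor u w) bs (n : Int) = PySem.Int.bxor u (pvSubXor w bs (n : Int)) := by
  induction bs with
  | nil => intro n w; simp [pvSubXor_nil]
  | cons b t ih =>
    intro n w
    rw [pvSubXor_cons_nat, pvSubXor_cons_nat]
    by_cases hm : n % 2 = 1
    · rw [if_pos hm, if_pos hm, pvBxor_assoc]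
      exact ih _ _
    · rw [if_neg hm, if_neg hm]
      exact ih _ _

theorem pvSubXor_base (s : Int) (bs : List Int) (n : Nat) :
    pvSubXor s bs (n : Int) = PySem.Int.bxor s (pvSubXor 0 bs (n : Int)) := by
  have := pvSubXor_base_aux s bs n 0
  rwa [PySem.Int.bxor_zero] at this

-- ===== span lemmas =====
theorem pvSpan_concat (p v : Int) (bs : List Int) :
    pvSpan p (bs ++ [v]) = pvSpan p bs ++ (pvSpan p bs).map (fun x => PySem.Int.bxor x v) := by
  simp [pvSpan, List.foldl_append]

theorem pvSpan_shape_aux (p : Int) (bs : List Int) : ∀ (l : List Int),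
    ∃ t, bs.foldl (fun span v => span ++ span.map (fun x => PySem.Int.bxor x v)) (p :: l) = p :: t := by
  induction bs with
  | nil => intro l; exact ⟨l, rfl⟩
  | cons v bs ih =>
    intro l
    simpa using ih (l ++ (p :: l).map (fun x => PySem.Int.bxor x v))

theorem pvSpan_shape (p : Int) (bs : List Int) : ∃ t, pvSpan p bs = p :: t := by
  simpa [pvSpan] using pvSpan_shape_aux p bs []

theorem range_map_pvSubXor (p : Int) (bs : List Int) :
    (List.range (2 ^ bs.length)).map (fun (n : Nat) => pvSubXor p bs (n : Int)) = pvSpan p bs := by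
  induction bs using List.reverseRecOn with
  | nil => simp [pvSpan, pvSubXor_zero]
  | append_singleton bs v ih =>
    have hlen : (bs ++ [v]).length = bs.length + 1 := by simp
    have hsplit : 2 ^ (bs.length + 1) = 2 ^ bs.length + 2 ^ bs.length := by
      rw [pow_succ]; omega
    rw [hlen, hsplit, List.range_add, List.map_append, List.map_map, pvSpan_concat, ← ih]
    congr 1
    · apply List.map_congr_left
      intro n hn
      have hn' : n < 2 ^ bs.length := List.mem_range.mp hn
      have := pvSubXor_split bs [v] p n 0 hn'
      simpa [pvSubXor_zero] using this
    · rw [List.map_map]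
      apply List.map_congr_left
      intro n hn
      have hn' : n < 2 ^ bs.length := List.mem_range.mp hn
      have h1 : 2 ^ bs.length + n = n + 2 ^ bs.length * 1 := by omega
      simp only [Function.comp_apply, h1]
      rw [pvSubXor_split bs [v] p n 1 hn', pvSubXor_single]

-- ===== first-strict-min folds =====
theorem pvPairMin_aux (f : Int → Int) : ∀ (t : List Int) (b bw : Int),
    (t.foldl (fun (st : Option Int × Option Int) x =>
        let w := f x
        match st.2 with
        | none => (some x, some w)
        | some bw' => if w < bw' then (some x, some w) else st) (some b, some bw)).2
      = some (t.foldl (fun acc y => min acc (f y)) bw) := by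
  intro t
  induction t with
  | nil => intro b bw; rfl
  | cons y t ih =>
    intro b bw
    simp only [List.foldl_cons]
    by_cases h : f y < bw
    · rw [if_pos h, min_eq_right (le_of_lt h)]; exact ih y (f y)
    · rw [if_neg h, min_eq_left (by omega)]; exact ih b bw

theorem pvPairMin (f : Int → Int) (x : Int) (t : List Int) :
    ((x :: t).foldl (fun (st : Option Int × Option Int) x =>
        let w := f x
        match st.2 with
        | none => (some x, some w)
        | some bw' => if w < bw' then (some x, some w) else st) (none, none)).2
      = PySem.List.min? ((x :: t).map f) (fun y => y) := by
  simp only [List.foldl_cons, List.map_cons]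
  rw [PySem.List.min?_id_cons, List.foldl_map]
  exact pvPairMin_aux f t x (f x)

theorem pvOptMin_aux {α : Type} (f : α → Int) : ∀ (t : List α) (b : Int),
    (t.foldl (fun (bw : Option Int) x =>
        let tpc := f x
        match bw with
        | none => some tpc
        | some b' => if tpc < b' then some tpc else bw) (some b))
      = some (t.foldl (fun acc y => min acc (f y)) b) := by
  intro t
  induction t with
  | nil => intro b; rfl
  | cons y t ih =>
    intro b
    simp only [List.foldl_cons]
    by_cases h : f y < b
    · rw [if_pos h, min_eq_right (le_of_lt h)]; exact ih (f y)
    · rw [if_neg h, min_eq_left (by omega)]; exact ih b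

theorem pvOptMin {α : Type} (f : α → Int) (L : List α) :
    (L.foldl (fun (bw : Option Int) x =>
        let tpc := f x
        match bw with
        | none => some tpc
        | some b' => if tpc < b' then some tpc else bw) none)
      = PySem.List.min? (L.map f) (fun y => y) := by
  cases L with
  | nil => rfl
  | cons x t =>
    simp only [List.foldl_cons, List.map_cons]
    rw [PySem.List.min?_id_cons, List.foldl_map]
    exact pvOptMin_aux f t (f x)

-- ===== pyRange bridge =====
theorem pvRange_bridge (k : Nat) :
    PySem.List.pyRange 0 ((1 : Int) <<< k) 1 = (List.range (2 ^ k)).map Nat.cast := by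
  have h : (1 : Int) <<< k = ((2 ^ k : Nat) : Int) := by simp [Int.shiftLeft_eq]
  rw [h]
  exact PySem.List.pyRange_zero_natCast (2 ^ k)

-- ===== A's brute-force scan = min over the span =====
theorem pvScanA_eq (p : Int) (bs : List Int) :
    (pvScanA p bs).2
      = PySem.List.min? ((pvSpan p bs).map (fun x => (PySem.Int.bitCount x : Int))) (fun y => y) := by
  obtain ⟨t, ht⟩ := pvSpan_shape p bs
  have key : pvScanA p bs
      = ((List.range (2 ^ bs.length)).map (fun (n : Nat) => pvSubXor p bs (n : Int))).foldl
          (fun (st : Option Int × Option Int) s =>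
            let w : Int := PySem.Int.bitCount s
            match st.2 with
            | none => (some s, some w)
            | some bw => if w < bw then (some s, some w) else st) (none, none) := by
    simp only [pvScanA]
    rw [pvRange_bridge, List.foldl_map, List.foldl_map]
  rw [key, range_map_pvSubXor, ht]
  exact pvPairMin _ p t

-- ===== keys of A's left_map = the left span, as a set =====
theorem pvLeftKeys (p : Int) (left : List Int) : ∀ (ms : List Int) (d : PySem.Dict Int Int) (x : Int),
    (x ∈ (ms.foldl (fun d s =>
        let xorv := pvSubXor 0 left s
        let vec := PySem.Int.bxor p xorv
        let pc : Int := PySem.Int.bitCount vec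
        match d.get? xorv with
        | none => d.insert xorv pc
        | some old => if pc < old then d.insert xorv pc else d) d).keys)
      ↔ (x ∈ d.keys ∨ x ∈ ms.map (fun s => pvSubXor 0 left s)) := by
  intro ms
  induction ms with
  | nil => simp
  | cons s ms ih =>
    intro d x
    rw [List.foldl_cons, ih]
    simp only [List.map_cons, List.mem_cons]
    cases hg : d.get? (pvSubXor 0 left s) with
    | none =>
      simp only [hg]
      rw [PySem.Dict.mem_keys_insert]
      tauto
    | some old =>
      have hmem : pvSubXor 0 left s ∈ d.keys := by
        by_contra hk
        rw [(PySem.Dict.get?_eq_none_iff_not_mem_keys _ _).mpr hk] at hg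
        cases hg
      simp only [hg]
      split_ifs with hlt
      · rw [PySem.Dict.mem_keys_insert]; tauto
      · constructor
        · tauto
        · rintro (h | h | h)
          · exact Or.inl h
          · rw [h]; exact Or.inl hmem
          · tauto

-- ===== A's meet-in-the-middle accumulator as a min? over the pair values =====
theorem pvBestW_eq (p : Int) (right : List Int) (items : List (Int × Int)) (ms : List Int) :
    ms.foldl (fun bw s =>
        let xorv := pvSubXor 0 right s
        items.foldl (fun (bw : Option Int) kv =>
          let cand := PySem.Int.bxor (PySem.Int.bxor p kv.1) xorv
          let tpc : Int := PySem.Int.bitCount cand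
          match bw with
          | none => some tpc
          | some b => if tpc < b then some tpc else bw) bw) none
      = PySem.List.min? (((ms.flatMap (fun s => items.map
            (fun kv => PySem.Int.bxor (PySem.Int.bxor p kv.1) (pvSubXor 0 right s)))).map
            (fun x => (PySem.Int.bitCount x : Int)))) (fun y => y) := by
  rw [← pvOptMin, List.foldl_flatMap]
  apply List.foldl_ext
  intro a s _
  exact (List.foldl_map
    (f := fun kv : Int × Int => PySem.Int.bxor (PySem.Int.bxor p kv.1) (pvSubXor 0 right s))
    (g := fun (bw : Option Int) (t : Int) =>
      let tpc : Int := PySem.Int.bitCount t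
      match bw with
      | none => some tpc
      | some b => if tpc < b then some tpc else bw)).symm

-- membership characterization of the span
theorem pvSpan_mem (p : Int) (bs : List Int) (x : Int) :
    x ∈ pvSpan p bs ↔ ∃ n : Nat, n < 2 ^ bs.length ∧ x = pvSubXor p bs (n : Int) := by
  rw [← range_map_pvSubXor]
  simp only [List.mem_map, List.mem_range]
  constructor
  · rintro ⟨n, hn, rfl⟩; exact ⟨n, hn, rfl⟩
  · rintro ⟨n, hn, rfl⟩; exact ⟨n, hn, rfl⟩

theorem pvGlue (p : Int) (basis : List Int) (nl nr : Nat)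
    (hnl : nl < 2 ^ (basis.take (basis.length / 2)).length) :
    PySem.Int.bxor (PySem.Int.bxor p (pvSubXor 0 (basis.take (basis.length / 2)) (nl : Int)))
        (pvSubXor 0 (basis.drop (basis.length / 2)) (nr : Int))
      = pvSubXor p basis ((nl + 2 ^ (basis.take (basis.length / 2)).length * nr : Nat) : Int) := by
  have hsplit := pvSubXor_split (basis.take (basis.length / 2)) (basis.drop (basis.length / 2)) p nl nr hnl
  rw [List.take_append_drop] at hsplit
  rw [hsplit, pvSubXor_base p (basis.take (basis.length / 2)) nl,
    pvSubXor_base (PySem.Int.bxor p (pvSubXor 0 (basis.take (basis.length / 2)) (nl : Int)))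
      (basis.drop (basis.length / 2)) nr]

theorem pvMITMmin (p : Int) (basis : List Int) (items : List (Int × Int))
    (hkeys : ∀ x : Int, x ∈ items.map Prod.fst ↔ x ∈ pvSpan 0 (basis.take (basis.length / 2)))
    (hne : items ≠ []) :
    PySem.List.min?
      ((((List.range (2 ^ (basis.drop (basis.length / 2)).length)).map
          (Nat.cast : Nat → Int)).flatMap
          (fun s => items.map (fun kv => PySem.Int.bxor (PySem.Int.bxor p kv.1)
            (pvSubXor 0 (basis.drop (basis.length / 2)) s)))).map
        (fun x => (PySem.Int.bitCount x : Int)))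
      (fun y => y)
      = PySem.List.min? ((pvSpan p basis).map (fun x => (PySem.Int.bitCount x : Int))) (fun y => y) := by
  set L := basis.take (basis.length / 2) with hL
  set R := basis.drop (basis.length / 2) with hR
  have hlen : L.length + R.length = basis.length := by
    rw [hL, hR]; simp; omega
  have hposL : 0 < 2 ^ L.length := Nat.two_pow_pos _
  have hposR : 0 < 2 ^ R.length := Nat.two_pow_pos _
  -- the flattened pair list
  set V := (((List.range (2 ^ R.length)).map (Nat.cast : Nat → Int)).flatMap
      (fun s => items.map (fun kv => PySem.Int.bxor (PySem.Int.bxor p kv.1) (pvSubXor 0 R s)))) with hV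
  -- V is nonempty
  obtain ⟨kv0, hkv0⟩ : (∃ kv, kv ∈ items) := by
    cases items with
    | nil => exact absurd rfl hne
    | cons a t => exact ⟨a, List.mem_cons_self⟩
  have hVne : V ≠ [] := by
    have : PySem.Int.bxor (PySem.Int.bxor p kv0.1) (pvSubXor 0 R ((0 : Nat) : Int)) ∈ V := by
      rw [hV, List.mem_flatMap]
      exact ⟨((0 : Nat) : Int), List.mem_map_of_mem (List.mem_range.mpr hposR),
        List.mem_map_of_mem hkv0⟩
    intro h; rw [h] at this; cases this
  -- every V element is a span element, and conversely
  have hVsub : ∀ v ∈ V, v ∈ pvSpan p basis := by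
    intro v hv
    rw [hV, List.mem_flatMap] at hv
    obtain ⟨s, hs, hv⟩ := hv
    rw [List.mem_map] at hs
    obtain ⟨nr, hnr, rfl⟩ := hs
    rw [List.mem_map] at hv
    obtain ⟨kv, hkv, rfl⟩ := hv
    have hk1 : kv.1 ∈ pvSpan 0 L := (hkeys kv.1).mp (List.mem_map_of_mem hkv)
    rw [pvSpan_mem] at hk1
    obtain ⟨nl, hnl, hkv1⟩ := hk1
    rw [List.mem_range] at hnr
    rw [hkv1, pvGlue p basis nl nr (by rw [← hL]; exact hnl)]
    rw [pvSpan_mem]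
    refine ⟨nl + 2 ^ L.length * nr, ?_, by rw [hL]⟩
    calc nl + 2 ^ L.length * nr < 2 ^ L.length * (nr + 1) := by
            rw [Nat.mul_add, Nat.mul_one]; omega
      _ ≤ 2 ^ L.length * 2 ^ R.length := Nat.mul_le_mul_left _ (by omega)
      _ = 2 ^ basis.length := by rw [← pow_add, hlen]
  have hSsub : ∀ x ∈ pvSpan p basis, ∃ v ∈ V, v = x := by
    intro x hx
    rw [pvSpan_mem] at hx
    obtain ⟨n, hn, rfl⟩ := hx
    set nl := n % 2 ^ L.length with hnl
    set nr := n / 2 ^ L.length with hnr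
    have h1 : nl < 2 ^ L.length := Nat.mod_lt _ hposL
    have h2 : nr < 2 ^ R.length := by
      rw [hnr, Nat.div_lt_iff_lt_mul hposL]
      calc n < 2 ^ basis.length := hn
        _ = 2 ^ L.length * 2 ^ R.length := by rw [← pow_add, hlen]
        _ = 2 ^ R.length * 2 ^ L.length := Nat.mul_comm _ _
    have h3 : n = nl + 2 ^ L.length * nr := (Nat.mod_add_div n (2 ^ L.length)).symm
    have hxl : pvSubXor 0 L ((nl : Nat) : Int) ∈ pvSpan 0 L := by
      rw [pvSpan_mem]; exact ⟨nl, h1, rfl⟩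
    obtain ⟨kv, hkv, hkv1⟩ : ∃ kv ∈ items, kv.1 = pvSubXor 0 L ((nl : Nat) : Int) := by
      have := (hkeys _).mpr hxl
      rw [List.mem_map] at this
      obtain ⟨kv, hkv, h⟩ := this
      exact ⟨kv, hkv, h⟩
    refine ⟨PySem.Int.bxor (PySem.Int.bxor p kv.1) (pvSubXor 0 R ((nr : Nat) : Int)), ?_, ?_⟩
    · rw [hV, List.mem_flatMap]
      exact ⟨((nr : Nat) : Int), List.mem_map_of_mem (List.mem_range.mpr h2),
        List.mem_map_of_mem hkv⟩
    · rw [hkv1, pvGlue p basis nl nr (by rw [← hL]; exact h1), ← hL, ← h3]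
  -- both min?s are some, and equal by antisymmetry
  have hSne : (pvSpan p basis) ≠ [] := by
    obtain ⟨t, ht⟩ := pvSpan_shape p basis
    rw [ht]; exact List.cons_ne_nil _ _
  obtain ⟨m1, hm1⟩ : ∃ m1, PySem.List.min? (V.map (fun x => (PySem.Int.bitCount x : Int))) (fun y => y) = some m1 := by
    cases h : PySem.List.min? (V.map (fun x => (PySem.Int.bitCount x : Int))) (fun y => y) with
    | none => rw [PySem.List.min?_eq_none_iff] at h
              exact absurd (List.map_eq_nil_iff.mp h) hVne
    | some m => exact ⟨m, rfl⟩
  obtain ⟨m2, hm2⟩ : ∃ m2, PySem.List.min? ((pvSpan p basis).map (fun x => (PySem.Int.bitCount x : Int))) (fun y => y) = some m2 := by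
    cases h : PySem.List.min? ((pvSpan p basis).map (fun x => (PySem.Int.bitCount x : Int))) (fun y => y) with
    | none => rw [PySem.List.min?_eq_none_iff] at h
              exact absurd (List.map_eq_nil_iff.mp h) hSne
    | some m => exact ⟨m, rfl⟩
  rw [hm1, hm2]
  have hmem1 := PySem.List.min?_mem hm1
  have hmem2 := PySem.List.min?_mem hm2
  have hmin1 := PySem.List.min?_isMin hm1
  have hmin2 := PySem.List.min?_isMin hm2
  congr 1
  apply le_antisymm
  · -- m1 ≤ m2 : m2 = bc of a span element, which is also a V value
    rw [List.mem_map] at hmem2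
    obtain ⟨x, hx, rfl⟩ := hmem2
    obtain ⟨v, hv, rfl⟩ := hSsub x hx
    exact hmin1 _ (List.mem_map_of_mem hv)
  · -- m2 ≤ m1
    rw [List.mem_map] at hmem1
    obtain ⟨v, hv, rfl⟩ := hmem1
    exact hmin2 _ (List.mem_map_of_mem (hVsub v hv))


theorem pvClimb_eq (x w : Int) (bs : List Int) : pvClimbB x w bs = pvClimbA x w bs := by
  induction x, w using pvClimbB.induct (bs := bs) with
  | case1 x w r h ih =>
    rw [pvClimbB, pvClimbA]
    have h' : (pvPassA x w false bs).2.2 = true := by rw [← pvSweep_eq_passA]; exact h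
    rw [dif_pos h, dif_pos h']
    rw [pvSweep_eq_passA]
    have ih' := ih
    rw [show r = pvSweep x w false bs from rfl, pvSweep_eq_passA] at ih'
    exact ih'
  | case2 x w r h =>
    rw [pvClimbB, pvClimbA]
    have h' : ¬ (pvPassA x w false bs).2.2 = true := by rw [← pvSweep_eq_passA]; exact h
    rw [dif_neg h, dif_neg h', pvSweep_eq_passA]

theorem pvMitmA_eq (p : Int) (basis : List Int) :
    pvMitmA p basis
      = match PySem.List.min? ((pvSpan p basis).map (fun x => (PySem.Int.bitCount x : Int))) (fun y => y) with
        | some m => m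
        | none => PySem.Int.bitCount p := by
  have hhalf : PySem.Int.floordiv ((basis.length : Nat) : Int) 2 = ((basis.length / 2 : Nat) : Int) := by
    exact_mod_cast PySem.Int.floordiv_natCast basis.length 2
  simp only [pvMitmA]
  rw [hhalf, PySem.List.slice_to_natCast, PySem.List.slice_from_natCast,
      pvRange_bridge, pvRange_bridge, pvBestW_eq]
  set L := basis.take (basis.length / 2) with hL
  set D := (((List.range (2 ^ L.length)).map (Nat.cast : Nat → Int)).foldl
      (fun d s =>
        let xorv := pvSubXor 0 L s
        let vec := PySem.Int.bxor p xorv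
        let pc : Int := PySem.Int.bitCount vec
        match d.get? xorv with
        | none => d.insert xorv pc
        | some old => if pc < old then d.insert xorv pc else d)
      PySem.Dict.empty) with hD
  have hkeys : ∀ x : Int, x ∈ D.items.map Prod.fst ↔ x ∈ pvSpan 0 L := by
    intro x
    have h1 : D.items.map Prod.fst = D.keys := rfl
    rw [h1, hD, pvLeftKeys p L _ PySem.Dict.empty x]
    rw [List.map_map, show ((fun s => pvSubXor 0 L s) ∘ (Nat.cast : Nat → Int))
        = fun (n : Nat) => pvSubXor 0 L (n : Int) from rfl]
    rw [range_map_pvSubXor]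
    simp [PySem.Dict.keys_empty]
  have hne : D.items ≠ [] := by
    have h0 : pvSubXor 0 L ((0 : Nat) : Int) ∈ pvSpan 0 L := by
      rw [pvSpan_mem]; exact ⟨0, Nat.two_pow_pos _, rfl⟩
    have := (hkeys _).mpr h0
    intro hnil
    rw [hnil] at this
    cases this
  rw [pvMITMmin p basis D.items hkeys hne]

theorem pvMain (p : Int) (basis : List Int) (cutoff : Int) :
    min_weight_solution p basis cutoff = min_weight_solution_alt p basis cutoff := by
  by_cases hk0 : ((basis.length : Nat) : Int) = 0
  · have hb : basis = [] := List.length_eq_zero_iff.mp (by exact_mod_cast hk0)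
    subst hb
    simp only [min_weight_solution, min_weight_solution_alt, List.length_nil, Nat.cast_zero]
    rw [if_pos trivial, if_pos (Or.inr (by norm_num : (0:Int) ≤ 40))]
    rw [show pvSpan p [] = [p] from rfl, List.map_singleton, PySem.List.min?_id_cons]
    rfl
  · by_cases hc : ((basis.length : Nat) : Int) > cutoff
    · by_cases h40 : ((basis.length : Nat) : Int) ≤ 40
      · simp only [min_weight_solution, min_weight_solution_alt]
        rw [if_neg hk0, if_pos hc, if_pos h40, if_pos (Or.inr h40), pvMitmA_eq]
        obtain ⟨t, ht⟩ := pvSpan_shape p basis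
        rw [ht, List.map_cons, PySem.List.min?_id_cons]
      · simp only [min_weight_solution, min_weight_solution_alt]
        rw [if_neg hk0, if_pos hc, if_neg h40, if_neg (by omega), pvClimb_eq]
    · simp only [min_weight_solution, min_weight_solution_alt]
      rw [if_neg hk0, if_neg hc, if_pos (Or.inl (by omega)), pvScanA_eq]

-- ===== VERDICT (by name: the statement is the Claim_ definition above) =====
theorem min_weight_solution_spec : Claim_equal_min_weight_solution := by
  intro particular basis cutoff _
  exact pvMain particular basis cutoff
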